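-- pv_equiv track=rewrite | github.com/casvde/WorldFolder | wawa.py | create_indexed_padding
-- ===== SOURCE A (Python) =====
-- def create_indexed_padding(grid):
--     height = len(grid)
--     width = len(grid[0])
--     indexed_padding = [[0 for _ in range(width)] for _ in range(height)]
--
--     directions = [
--         (-1,  0),  # 1: Left
--         (-1, -1),  # 2: Top-left
--         ( 0, -1),  # 3: Top
--         ( 1, -1),  # 4: Top-right
--         ( 1,  0),  # 5: Right
--         ( 1,  1),  # 6: Bottom-right
--         ( 0,  1),  # 7: Bottom
--         (-1,  1),  # 8: Bottom-left
--     ]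
--
--     for y in range(height):
--         for x in range(width):
--             if grid[y][x] > 0:
--                 for idx, (dx, dy) in enumerate(directions):
--                     nx, ny = x + dx, y + dy
--                     if 0 <= nx < width and 0 <= ny < height:
--                         if grid[ny][nx] == 0 and indexed_padding[ny][nx] == 0:
--                             indexed_padding[ny][nx] = idx + 1  # shift index by +1
--
--     return indexed_padding
-- ===== SOURCE B (Python) =====
-- def create_indexed_padding(grid):
--     height = len(grid)
--     width = len(grid[0])
--     # direction index of the offset (target - source), per A's table
--     dir_index = {(-1, 0): 1, (-1, -1): 2, (0, -1): 3, (1, -1): 4,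
--                  (1, 0): 5, (1, 1): 6, (0, 1): 7, (-1, 1): 8}
--     out = []
--     for y in range(height):
--         row = []
--         for x in range(width):
--             v = 0
--             if grid[y][x] == 0:
--                 # first positive neighbor in row-major scan order wins
--                 for py in (y - 1, y, y + 1):
--                     for px in (x - 1, x, x + 1):
--                         if 0 <= py < height and 0 <= px < width \
--                                 and (py, px) != (y, x) and grid[py][px] > 0:
--                             v = dir_index[(x - px, y - py)]
--                             break
--                     if v:
--                         break
--             row.append(v)
--         out.append(row)
--     return out
-- ===== Notes on version B (the rewrite author's own statement) =====
-- stated objective: alternative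
-- what changed: A scatters: it scans positive source cells in row-major order and marks each still-unmarked zero neighbor (first write wins); B gathers: it builds each output cell directly, picking the first positive neighbor in row-major scan order of the 3x3 neighborhood and looking up the direction index of the reverse offset.
import Mathlib
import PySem

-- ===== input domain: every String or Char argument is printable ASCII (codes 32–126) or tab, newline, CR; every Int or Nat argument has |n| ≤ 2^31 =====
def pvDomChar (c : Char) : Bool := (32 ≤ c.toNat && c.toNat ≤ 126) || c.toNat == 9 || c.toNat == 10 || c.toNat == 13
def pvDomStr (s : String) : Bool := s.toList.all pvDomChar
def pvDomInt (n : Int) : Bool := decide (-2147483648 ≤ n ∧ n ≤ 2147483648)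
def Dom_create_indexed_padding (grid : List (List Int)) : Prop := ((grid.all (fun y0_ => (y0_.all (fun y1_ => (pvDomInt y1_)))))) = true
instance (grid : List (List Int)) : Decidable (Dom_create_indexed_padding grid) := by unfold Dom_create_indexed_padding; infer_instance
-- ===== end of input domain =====

-- B re-implements A as a gather (each zero cell picks its first positive neighbor in scan
-- order) instead of A's scatter over sources with first-write-wins; objective: alternative.

-- shared helper: grid[y][x] read with an out-of-range default (all admitted accesses are in range)
def cell (g : List (List Int)) (y x : Nat) : Int := (g.getD y []).getD x 0

-- ===== PORT A =====
-- A-side helper: indexed_padding[y][x] = v (in-place list update)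
def pySet2 (m : List (List Int)) (y x : Nat) (v : Int) : List (List Int) :=
  m.set y ((m.getD y []).set x v)

def dirs : List (Int × Int) :=
  [(-1, 0), (-1, -1), (0, -1), (1, -1), (1, 0), (1, 1), (0, 1), (-1, 1)]

def create_indexed_padding (grid : List (List Int)) : List (List Int) :=
  let height := grid.length
  let width := (grid.headD []).length
  let init : List (List Int) := (List.range height).map (fun _ => (List.range width).map (fun _ => (0 : Int)))
  (List.range height).foldl (fun pad y =>
    (List.range width).foldl (fun pad x =>
      if 0 < cell grid y x then
        dirs.zipIdx.foldl (fun pad p =>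
          let nx : Int := (x : Int) + p.1.1
          let ny : Int := (y : Int) + p.1.2
          if 0 ≤ nx ∧ nx < (width : Int) ∧ 0 ≤ ny ∧ ny < (height : Int) then
            if cell grid ny.toNat nx.toNat = 0 ∧ cell pad ny.toNat nx.toNat = 0 then
              pySet2 pad ny.toNat nx.toNat ((p.2 : Int) + 1)
            else pad
          else pad) pad
      else pad) pad) init

-- ===== PORT B =====
-- B-side helper: dir_index (the key is always present when B looks it up, so getD is exact)
def dirIndex : PySem.Dict (Int × Int) Int :=
  PySem.Dict.ofList [((-1, 0), 1), ((-1, -1), 2), ((0, -1), 3), ((1, -1), 4),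
                     ((1, 0), 5), ((1, 1), 6), ((0, 1), 7), ((-1, 1), 8)]

-- B-side helper: the break/break double loop = first match in the 9-candidate row-major scan
def nbrVal (grid : List (List Int)) (height width : Nat) (y x : Nat) : Int :=
  match ([((y : Int) - 1, (x : Int) - 1), ((y : Int) - 1, (x : Int)), ((y : Int) - 1, (x : Int) + 1),
     ((y : Int), (x : Int) - 1), ((y : Int), (x : Int)), ((y : Int), (x : Int) + 1),
     ((y : Int) + 1, (x : Int) - 1), ((y : Int) + 1, (x : Int)), ((y : Int) + 1, (x : Int) + 1)] : List (Int × Int)).find?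
    (fun q =>
      decide (0 ≤ q.1 ∧ q.1 < (height : Int) ∧ 0 ≤ q.2 ∧ q.2 < (width : Int) ∧
              ¬(q.1 = (y : Int) ∧ q.2 = (x : Int)) ∧ 0 < cell grid q.1.toNat q.2.toNat)) with
  | some q => PySem.Dict.getD dirIndex ((x : Int) - q.2, (y : Int) - q.1) 0
  | none => 0

def create_indexed_padding_alt (grid : List (List Int)) : List (List Int) :=
  let height := grid.length
  let width := (grid.headD []).length
  (List.range height).map (fun y =>
    (List.range width).map (fun x =>
      if cell grid y x = 0 then nbrVal grid height width y x else 0))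

-- ===== PRECONDITION & SPEC =====
-- Pre_ excludes exactly the inputs where the Python A raises IndexError: the empty grid
-- (len(grid[0])) and grids with a row shorter than row 0 (grid[y][x] for x < width).
def Pre_create_indexed_padding (grid : List (List Int)) : Prop :=
  grid ≠ [] ∧ ∀ row ∈ grid, (grid.headD []).length ≤ row.length
instance (grid : List (List Int)) : Decidable (Pre_create_indexed_padding grid) := by
  unfold Pre_create_indexed_padding; infer_instance

def pvWitness_create_indexed_padding : List (List Int) := [[1, 0], [0, 0]]

def Spec_create_indexed_padding (grid : List (List Int)) (out : List (List Int)) : Prop := out = create_indexed_padding_alt grid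
instance (grid : List (List Int)) (out : List (List Int)) : Decidable (Spec_create_indexed_padding grid out) := by unfold Spec_create_indexed_padding; infer_instance

-- ===== CLAIM (what is proved, stated in full; the proofs are below) =====
def Claim_equal_create_indexed_padding : Prop := ∀ (grid : List (List Int)), Dom_create_indexed_padding grid → Pre_create_indexed_padding grid → Spec_create_indexed_padding grid (create_indexed_padding grid)

-- ===== LEMMAS AND PROOFS =====

def shaped (H W : Nat) (pad : List (List Int)) : Prop :=
  pad.length = H ∧ ∀ r ∈ pad, r.length = W

theorem shaped_pySet2 {H W : Nat} {pad : List (List Int)} (h : shaped H W pad) (y x : Nat) (v : Int) :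
    shaped H W (pySet2 pad y x v) := by
  obtain ⟨h1, h2⟩ := h
  refine ⟨by simp [pySet2, h1], ?_⟩
  intro r hr
  by_cases hy : y < pad.length
  · rcases List.mem_or_eq_of_mem_set hr with h | h
    · exact h2 r h
    · subst h
      simp [List.getD_eq_getElem?_getD, List.getElem?_eq_getElem hy]
      exact h2 _ (List.getElem_mem hy)
  · rw [pySet2, List.set_eq_of_length_le (by omega)] at hr
    exact h2 r hr

theorem cell_pySet2_same {H W : Nat} {pad : List (List Int)} (h : shaped H W pad)
    {y x : Nat} (hy : y < H) (hx : x < W) (v : Int) :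
    cell (pySet2 pad y x v) y x = v := by
  obtain ⟨h1, h2⟩ := h
  have hy' : y < pad.length := by omega
  have hrow : pad[y].length = W := h2 _ (List.getElem_mem hy')
  simp [cell, pySet2, List.getD_eq_getElem?_getD, hy', List.getElem_set_self]
  rw [List.getElem?_eq_getElem (by simp [List.getD_eq_getElem?_getD, List.getElem?_eq_getElem hy']; omega),
      List.getElem_set_self]
  rfl

theorem cell_pySet2_ne {pad : List (List Int)} {y x y' x' : Nat} (h : y ≠ y' ∨ x ≠ x') (v : Int) :
    cell (pySet2 pad y' x' v) y x = cell pad y x := by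
  rcases h with h | h
  · simp [cell, pySet2, List.getD_eq_getElem?_getD, List.getElem?_set_ne (by omega : y' ≠ y)]
  · by_cases hyy : y = y'
    · subst hyy
      simp [cell, pySet2, List.getD_eq_getElem?_getD]
      by_cases hy : y < pad.length
      · simp [List.getElem?_set_self hy, List.getElem?_eq_getElem hy,
              List.getElem?_set_ne (by omega : x' ≠ x)]
      · simp [hy]
    · simp [cell, pySet2, List.getD_eq_getElem?_getD, List.getElem?_set_ne (by omega : y' ≠ y)]

def step (pad : List (List Int)) (e : Nat × Nat × Int) : List (List Int) :=
  if cell pad e.1 e.2.1 = 0 then pySet2 pad e.1 e.2.1 e.2.2 else pad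

theorem shaped_step {H W : Nat} {pad : List (List Int)} (h : shaped H W pad) (e : Nat × Nat × Int) :
    shaped H W (step pad e) := by
  unfold step; split_ifs
  · exact shaped_pySet2 h _ _ _
  · exact h

theorem shaped_foldl_step {H W : Nat} {pad : List (List Int)} (h : shaped H W pad)
    (es : List (Nat × Nat × Int)) : shaped H W (es.foldl step pad) := by
  induction es generalizing pad with
  | nil => exact h
  | cons e es ih => exact ih (shaped_step h e)

theorem fold_cell {H W : Nat} (es : List (Nat × Nat × Int))
    {y x : Nat} (hy : y < H) (hx : x < W) :
    ∀ pad : List (List Int), shaped H W pad → (∀ e ∈ es, e.1 < H ∧ e.2.1 < W ∧ 0 < e.2.2) →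
    cell (es.foldl step pad) y x =
      if cell pad y x ≠ 0 then cell pad y x
      else (match es.find? (fun e => e.1 == y && e.2.1 == x) with
            | some e => e.2.2
            | none => 0) := by
  induction es with
  | nil => intro pad hsh he; simp [List.foldl]
  | cons e es ih =>
    intro pad hsh he
    obtain ⟨he1, he2, he3⟩ := he e (by simp)
    have he' : ∀ e' ∈ es, e'.1 < H ∧ e'.2.1 < W ∧ 0 < e'.2.2 := fun e' h' => he e' (by simp [h'])
    by_cases ht : e.1 = y ∧ e.2.1 = x
    · obtain ⟨hty, htx⟩ := ht
      subst hty; subst htx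
      by_cases hz : cell pad e.1 e.2.1 = 0
      · have hstep : step pad e = pySet2 pad e.1 e.2.1 e.2.2 := by simp [step, hz]
        rw [List.foldl_cons, hstep, ih _ (shaped_pySet2 hsh _ _ _) he']
        rw [cell_pySet2_same hsh hy hx]
        have hnz : e.2.2 ≠ 0 := by omega
        simp [hz, List.find?_cons, hnz]
      · have hstep : step pad e = pad := by simp [step, hz]
        rw [List.foldl_cons, hstep, ih _ hsh he']
        simp [hz]
    · have hcell : cell (step pad e) y x = cell pad y x := by
        unfold step; split_ifs
        · exact cell_pySet2_ne (by omega) _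
        · rfl
      have hfind : (e :: es).find? (fun e => e.1 == y && e.2.1 == x) =
          es.find? (fun e => e.1 == y && e.2.1 == x) := by
        simp [List.find?_cons]
        split
        · next h => exfalso; simp at h; omega
        · rfl
      rw [List.foldl_cons, hfind]
      rw [ih _ (shaped_step hsh e) he', hcell]

def evDir (grid : List (List Int)) (H W y x : Nat) (p : (Int × Int) × Nat) : List (Nat × Nat × Int) :=
  if 0 ≤ (x:Int)+p.1.1 ∧ (x:Int)+p.1.1 < (W:Int) ∧ 0 ≤ (y:Int)+p.1.2 ∧ (y:Int)+p.1.2 < (H:Int) ∧ cell grid ((y:Int)+p.1.2).toNat ((x:Int)+p.1.1).toNat = 0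
  then [(((y:Int)+p.1.2).toNat, ((x:Int)+p.1.1).toNat, (p.2:Int)+1)] else []

def evSrc (grid : List (List Int)) (H W y x : Nat) : List (Nat × Nat × Int) :=
  if 0 < cell grid y x then dirs.zipIdx.flatMap (evDir grid H W y x) else []

def evAll (grid : List (List Int)) (H W : Nat) : List (Nat × Nat × Int) :=
  (List.range H).flatMap (fun y => (List.range W).flatMap (fun x => evSrc grid H W y x))

def initPad (H W : Nat) : List (List Int) :=
  (List.range H).map (fun _ => (List.range W).map (fun _ => (0:Int)))

theorem dirbody_eq (grid : List (List Int)) (H W y x : Nat) (pad : List (List Int)) (p : (Int × Int) × Nat) :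
    (if 0 ≤ (x : Int) + p.1.1 ∧ (x : Int) + p.1.1 < (W : Int) ∧ 0 ≤ (y : Int) + p.1.2 ∧ (y : Int) + p.1.2 < (H : Int) then
       if cell grid ((y:Int)+p.1.2).toNat ((x:Int)+p.1.1).toNat = 0 ∧ cell pad ((y:Int)+p.1.2).toNat ((x:Int)+p.1.1).toNat = 0 then
         pySet2 pad ((y:Int)+p.1.2).toNat ((x:Int)+p.1.1).toNat ((p.2 : Int) + 1)
       else pad
     else pad) = (evDir grid H W y x p).foldl step pad := by
  unfold evDir step
  split_ifs <;> simp_all [List.foldl]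

theorem A_flatten (grid : List (List Int)) :
    create_indexed_padding grid =
      (evAll grid grid.length (grid.headD []).length).foldl step
        (initPad grid.length (grid.headD []).length) := by
  unfold create_indexed_padding evAll initPad
  rw [List.foldl_flatMap]
  apply List.foldl_ext
  intro pad y _
  rw [List.foldl_flatMap]
  apply List.foldl_ext
  intro pad x _
  show _ = (evSrc grid grid.length (grid.headD []).length y x).foldl step pad
  unfold evSrc
  by_cases hp : 0 < cell grid y x
  · simp only [hp, if_pos, List.foldl_flatMap]
    apply List.foldl_ext
    intro pad p _
    exact dirbody_eq grid _ _ y x pad p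
  · simp [hp]

theorem dirs_facts : ∀ p ∈ dirs.zipIdx,
    (-1 ≤ p.1.1 ∧ p.1.1 ≤ 1 ∧ -1 ≤ p.1.2 ∧ p.1.2 ≤ 1 ∧ ¬(p.1.1 = 0 ∧ p.1.2 = 0)) := by decide

theorem mem_evSrc {grid : List (List Int)} {H W y' x' : Nat} {e : Nat × Nat × Int}
    (h : e ∈ evSrc grid H W y' x') :
    e.1 < H ∧ e.2.1 < W ∧ 0 < e.2.2 ∧ cell grid e.1 e.2.1 = 0 ∧
      (y' : Int) - 1 ≤ e.1 ∧ (e.1 : Int) ≤ (y' : Int) + 1 ∧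
      (x' : Int) - 1 ≤ e.2.1 ∧ (e.2.1 : Int) ≤ (x' : Int) + 1 ∧ ¬(e.1 = y' ∧ e.2.1 = x') := by
  unfold evSrc at h
  split at h
  · rw [List.mem_flatMap] at h
    obtain ⟨p, hp, he⟩ := h
    obtain ⟨hd1, hd2, hd3, hd4, hd5⟩ := dirs_facts p hp
    unfold evDir at he
    split at he
    · next hc =>
      obtain ⟨hc1, hc2, hc3, hc4, hc5⟩ := hc
      simp at he
      subst he
      simp only
      refine ⟨by omega, by omega, by omega, ?_, by omega, by omega, by omega, by omega, by omega⟩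
      exact hc5
    · simp at he
  · simp at h

theorem mem_evAll {grid : List (List Int)} {H W : Nat} {e : Nat × Nat × Int}
    (h : e ∈ evAll grid H W) : e.1 < H ∧ e.2.1 < W ∧ 0 < e.2.2 ∧ cell grid e.1 e.2.1 = 0 := by
  unfold evAll at h
  rw [List.mem_flatMap] at h
  obtain ⟨y', _, h⟩ := h
  rw [List.mem_flatMap] at h
  obtain ⟨x', _, h⟩ := h
  have := mem_evSrc h
  tauto

theorem shaped_initPad (H W : Nat) : shaped H W (initPad H W) := by
  constructor
  · simp [initPad]
  · intro r hr
    simp [initPad] at hr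
    simp [hr]

theorem cell_initPad (H W y x : Nat) : cell (initPad H W) y x = 0 := by
  simp [initPad, cell, List.getD_eq_getElem?_getD, List.getElem?_replicate,
        List.map_const']
  split_ifs <;> simp [List.getElem?_replicate] <;> split_ifs <;> simp

theorem evDir_find {grid : List (List Int)} {H W y x : Nat} (y' x' : Nat)
    (hy : y < H) (hx : x < W) (hg : cell grid y x = 0) (p : (Int × Int) × Nat) :
    (evDir grid H W y' x' p).find? (fun e => e.1 == y && e.2.1 == x) =
      (if (x' : Int) + p.1.1 = (x : Int) ∧ (y' : Int) + p.1.2 = (y : Int)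
       then some (y, x, (p.2 : Int) + 1) else none) := by
  unfold evDir
  split
  · next hc =>
    obtain ⟨hc1, hc2, hc3, hc4, hc5⟩ := hc
    simp only [List.find?_cons, List.find?_nil]
    by_cases ht : ((x' : Int) + p.1.1 = (x : Int) ∧ (y' : Int) + p.1.2 = (y : Int))
    · have h1 : ((y' : Int) + p.1.2).toNat = y := by omega
      have h2 : ((x' : Int) + p.1.1).toNat = x := by omega
      simp [h1, h2, ht]
    · have : (((y' : Int) + p.1.2).toNat == y && ((x' : Int) + p.1.1).toNat == x) = false := by
        simp only [Bool.and_eq_false_iff, beq_eq_false_iff_ne, ne_eq]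
        omega
      simp [this, ht]
  · next hc =>
    by_cases ht : ((x' : Int) + p.1.1 = (x : Int) ∧ (y' : Int) + p.1.2 = (y : Int))
    · exfalso
      apply hc
      have h1 : ((y' : Int) + p.1.2).toNat = y := by omega
      have h2 : ((x' : Int) + p.1.1).toNat = x := by omega
      refine ⟨by omega, by omega, by omega, by omega, ?_⟩
      rw [h1, h2]; exact hg
    · simp [ht]

theorem ite_some_or {α : Type} (c : Prop) [Decidable c] (v : α) (rest : Option α) :
    ((if c then some v else none).or rest) = if c then some v else rest := by
  split_ifs <;> simp

theorem findSome?_cons_or {α β : Type} (a : α) (l : List α) (f : α → Option β) :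
    (a :: l).findSome? f = (f a).or (l.findSome? f) := by
  cases h : f a <;> simp [List.findSome?_cons, h]

theorem evSrc_find {grid : List (List Int)} {H W : Nat} (y x : Nat)
    (hy : y < H) (hx : x < W) (hg : cell grid y x = 0) (y' x' : Nat) :
    (evSrc grid H W y' x').find? (fun e => e.1 == y && e.2.1 == x) =
      (if 0 < cell grid y' x' ∧ (y : Int) - 1 ≤ (y' : Int) ∧ (y' : Int) ≤ (y : Int) + 1 ∧
          (x : Int) - 1 ≤ (x' : Int) ∧ (x' : Int) ≤ (x : Int) + 1 ∧ ¬(y' = y ∧ x' = x)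
       then some (y, x, PySem.Dict.getD dirIndex ((x : Int) - (x' : Int), (y : Int) - (y' : Int)) 0)
       else none) := by
  unfold evSrc
  by_cases hp : 0 < cell grid y' x'
  · rw [if_pos hp, List.find?_flatMap]
    have hz : dirs.zipIdx = [((-1, 0), 0), ((-1, -1), 1), ((0, -1), 2), ((1, -1), 3),
                            ((1, 0), 4), ((1, 1), 5), ((0, 1), 6), ((-1, 1), 7)] := by decide
    rw [hz]
    simp only [evDir_find y' x' hy hx hg, findSome?_cons_or, List.findSome?_nil,
               Option.or_assoc, ite_some_or, Option.or_none]
    simp only [hp, true_and]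
    split_ifs
    all_goals try rfl
    all_goals try omega
    all_goals
      first
      | (rw [show (x:Int) - (x':Int) = -1 from by omega, show (y:Int) - (y':Int) = 0 from by omega,
             show PySem.Dict.getD dirIndex (-1, 0) 0 = 1 from by decide]; norm_num)
      | (rw [show (x:Int) - (x':Int) = -1 from by omega, show (y:Int) - (y':Int) = -1 from by omega,
             show PySem.Dict.getD dirIndex (-1, -1) 0 = 2 from by decide]; norm_num)
      | (rw [show (x:Int) - (x':Int) = 0 from by omega, show (y:Int) - (y':Int) = -1 from by omega,
             show PySem.Dict.getD dirIndex (0, -1) 0 = 3 from by decide]; norm_num)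
      | (rw [show (x:Int) - (x':Int) = 1 from by omega, show (y:Int) - (y':Int) = -1 from by omega,
             show PySem.Dict.getD dirIndex (1, -1) 0 = 4 from by decide]; norm_num)
      | (rw [show (x:Int) - (x':Int) = 1 from by omega, show (y:Int) - (y':Int) = 0 from by omega,
             show PySem.Dict.getD dirIndex (1, 0) 0 = 5 from by decide]; norm_num)
      | (rw [show (x:Int) - (x':Int) = 1 from by omega, show (y:Int) - (y':Int) = 1 from by omega,
             show PySem.Dict.getD dirIndex (1, 1) 0 = 6 from by decide]; norm_num)
      | (rw [show (x:Int) - (x':Int) = 0 from by omega, show (y:Int) - (y':Int) = 1 from by omega,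
             show PySem.Dict.getD dirIndex (0, 1) 0 = 7 from by decide]; norm_num)
      | (rw [show (x:Int) - (x':Int) = -1 from by omega, show (y:Int) - (y':Int) = 1 from by omega,
             show PySem.Dict.getD dirIndex (-1, 1) 0 = 8 from by decide]; norm_num)
  · simp [hp]

theorem findSome?_range_w3 {α : Type} (f : Nat → Option α) (n a : Nat) (ha : a < n)
    (h : ∀ i, i < n → ((i : Int) < (a : Int) - 1 ∨ (a : Int) + 1 < (i : Int)) → f i = none) :
    (List.range n).findSome? f =
      ([(a : Int) - 1, (a : Int), (a : Int) + 1].findSome? (fun i =>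
        if 0 ≤ i ∧ i < (n : Int) then f i.toNat else none)) := by
  have hsplit : List.range n = List.range a ++ (List.range (n - a)).map (a + ·) := by
    rw [← List.range_add]
    congr 1
    omega
  rw [hsplit, List.findSome?_append]
  have hpre : (List.range a).findSome? f =
      (if 0 ≤ (a : Int) - 1 ∧ (a : Int) - 1 < (n : Int) then f ((a : Int) - 1).toNat else none) := by
    by_cases ha0 : a = 0
    · subst ha0; simp
    · rw [if_pos (by omega)]
      have : (a : Int) - 1 = ((a - 1 : Nat) : Int) := by omega
      rw [this, Int.toNat_natCast]
      have hs : List.range a = List.range (a - 1) ++ [a - 1] := by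
        conv_lhs => rw [show a = (a - 1) + 1 by omega, List.range_succ]
      rw [hs, List.findSome?_append]
      have : (List.range (a - 1)).findSome? f = none := by
        rw [List.findSome?_eq_none_iff]
        intro i hi
        simp at hi
        exact h i (by omega) (by omega)
      simp [this]
  have hsuf : ((List.range (n - a)).map (a + ·)).findSome? f =
      (f a).or (if 0 ≤ (a : Int) + 1 ∧ (a : Int) + 1 < (n : Int) then f ((a : Int) + 1).toNat else none) := by
    rw [List.findSome?_map]
    have h1 : n - a = (n - a - 1) + 1 := by omega
    rw [h1, List.range_succ_eq_map]
    rw [findSome?_cons_or]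
    simp only [Function.comp_apply, Nat.add_zero]
    congr 1
    rw [List.findSome?_map]
    by_cases h2 : a + 1 < n
    · rw [if_pos (by omega)]
      have h3 : n - a - 1 = (n - a - 2) + 1 := by omega
      rw [h3, List.range_succ_eq_map, findSome?_cons_or]
      have : ((List.range (n - a - 2)).map Nat.succ).findSome? ((f ∘ (a + ·)) ∘ Nat.succ) = none := by
        rw [List.findSome?_eq_none_iff]
        intro i hi
        simp at hi
        obtain ⟨j, hj, rfl⟩ := hi
        simp only [Function.comp_apply]
        exact h _ (by omega) (by omega)
      rw [this, Option.or_none]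
      simp only [Function.comp_apply]
      have h4 : ((a : Int) + 1).toNat = a + 1 := by omega
      rw [h4]
    · rw [if_neg (by omega)]
      have h3 : n - a - 1 = 0 := by omega
      rw [h3]
      simp
  rw [hpre, hsuf]
  simp only [findSome?_cons_or, List.findSome?_nil, Option.or_none]
  rw [if_pos (show 0 ≤ (a : Int) ∧ (a : Int) < (n : Int) by omega)]
  rw [Int.toNat_natCast]

theorem findSome?_congr {α β : Type} {l : List α} {f g : α → Option β}
    (h : ∀ a ∈ l, f a = g a) : l.findSome? f = l.findSome? g := by
  induction l with
  | nil => rfl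
  | cons a l ih =>
    rw [findSome?_cons_or, findSome?_cons_or, h a (by simp),
        ih (fun a ha => h a (by simp [ha]))]

theorem ite_or3 {α : Type} (c : Prop) [Decidable c] (a b d : Option α) :
    (if c then (a.or (b.or d)) else none) =
      (if c then a else none).or ((if c then b else none).or (if c then d else none)) := by
  split_ifs <;> simp

theorem map_findSome? {α β γ : Type} (l : List α) (f : α → Option β) (g : β → γ) :
    (l.findSome? f).map g = l.findSome? (fun a => (f a).map g) := by
  induction l with
  | nil => rfl
  | cons a l ih => rw [findSome?_cons_or, findSome?_cons_or, Option.map_or, ih]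

theorem cand_eq {grid : List (List Int)} {H W y x : Nat} (a b : Int)
    (hwy : (y : Int) - 1 ≤ a ∧ a ≤ (y : Int) + 1) (hwx : (x : Int) - 1 ≤ b ∧ b ≤ (x : Int) + 1) :
    (if 0 ≤ a ∧ a < (H : Int) then
       (if 0 ≤ b ∧ b < (W : Int) then
         (if 0 < cell grid a.toNat b.toNat ∧ (y : Int) - 1 ≤ (a.toNat : Int) ∧
             (a.toNat : Int) ≤ (y : Int) + 1 ∧ (x : Int) - 1 ≤ (b.toNat : Int) ∧
             (b.toNat : Int) ≤ (x : Int) + 1 ∧ ¬(a.toNat = y ∧ b.toNat = x)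
          then some (y, x, PySem.Dict.getD dirIndex ((x : Int) - (b.toNat : Int), (y : Int) - (a.toNat : Int)) 0)
          else none)
        else none)
     else none)
   = (if 0 ≤ a ∧ a < (H : Int) ∧ 0 ≤ b ∧ b < (W : Int) ∧ ¬(a = (y : Int) ∧ b = (x : Int)) ∧
         0 < cell grid a.toNat b.toNat
      then some (y, x, PySem.Dict.getD dirIndex ((x : Int) - b, (y : Int) - a) 0) else none) := by
  split_ifs <;> try rfl
  · have e1 : ((a.toNat : Int)) = a := by omega
    have e2 : ((b.toNat : Int)) = b := by omega
    rw [e1, e2]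
  all_goals omega

theorem evAll_find_local {grid : List (List Int)} {H W : Nat} (y x : Nat)
    (hy : y < H) (hx : x < W) (hg : cell grid y x = 0) :
    (evAll grid H W).find? (fun e => e.1 == y && e.2.1 == x) =
      ([((y : Int) - 1, (x : Int) - 1), ((y : Int) - 1, (x : Int)), ((y : Int) - 1, (x : Int) + 1),
        ((y : Int), (x : Int) - 1), ((y : Int), (x : Int)), ((y : Int), (x : Int) + 1),
        ((y : Int) + 1, (x : Int) - 1), ((y : Int) + 1, (x : Int)), ((y : Int) + 1, (x : Int) + 1)].findSome?
        (fun q =>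
          if 0 ≤ q.1 ∧ q.1 < (H : Int) ∧ 0 ≤ q.2 ∧ q.2 < (W : Int) ∧
              ¬(q.1 = (y : Int) ∧ q.2 = (x : Int)) ∧ 0 < cell grid q.1.toNat q.2.toNat
          then some (y, x, PySem.Dict.getD dirIndex ((x : Int) - q.2, (y : Int) - q.1) 0)
          else none)) := by
  unfold evAll
  simp only [List.find?_flatMap]
  have hF : ∀ y' : Nat,
      ((List.range W).findSome? (fun x' => (evSrc grid H W y' x').find? (fun e => e.1 == y && e.2.1 == x))) =
        ([(x : Int) - 1, (x : Int), (x : Int) + 1].findSome? (fun j =>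
          if 0 ≤ j ∧ j < (W : Int) then
            (if 0 < cell grid y' j.toNat ∧ (y : Int) - 1 ≤ (y' : Int) ∧ (y' : Int) ≤ (y : Int) + 1 ∧
                (x : Int) - 1 ≤ (j.toNat : Int) ∧ (j.toNat : Int) ≤ (x : Int) + 1 ∧ ¬(y' = y ∧ j.toNat = x)
             then some (y, x, PySem.Dict.getD dirIndex ((x : Int) - (j.toNat : Int), (y : Int) - (y' : Int)) 0)
             else none)
          else none)) := by
    intro y'
    rw [findSome?_range_w3 _ W x hx ?_]
    · simp only [evSrc_find y x hy hx hg]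
    · intro i hi hfar
      rw [evSrc_find y x hy hx hg, if_neg (by omega)]
  simp only [hF]
  rw [findSome?_range_w3 _ H y hy ?_]
  · simp only [findSome?_cons_or, List.findSome?_nil, Option.or_none, ite_or3]
    rw [cand_eq ((y:Int)-1) ((x:Int)-1) (by omega) (by omega),
        cand_eq ((y:Int)-1) ((x:Int)) (by omega) (by omega),
        cand_eq ((y:Int)-1) ((x:Int)+1) (by omega) (by omega),
        cand_eq ((y:Int)) ((x:Int)-1) (by omega) (by omega),
        cand_eq ((y:Int)) ((x:Int)) (by omega) (by omega),
        cand_eq ((y:Int)) ((x:Int)+1) (by omega) (by omega),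
        cand_eq ((y:Int)+1) ((x:Int)-1) (by omega) (by omega),
        cand_eq ((y:Int)+1) ((x:Int)) (by omega) (by omega),
        cand_eq ((y:Int)+1) ((x:Int)+1) (by omega) (by omega)]
    simp only [Option.or_assoc]
  · intro i hi hfar
    rw [List.findSome?_eq_none_iff]
    intro q hq
    simp only [List.mem_cons, List.mem_singleton] at hq
    rcases hq with rfl | rfl | rfl | hq
    · split_ifs <;> first | rfl | omega
    · split_ifs <;> first | rfl | omega
    · split_ifs <;> first | rfl | omega
    · simp at hq

theorem nbr_chain (grid : List (List Int)) (H W y x : Nat) (l : List (Int × Int)) :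
    (match l.find? (fun q =>
        decide (0 ≤ q.1 ∧ q.1 < (H : Int) ∧ 0 ≤ q.2 ∧ q.2 < (W : Int) ∧
                ¬(q.1 = (y : Int) ∧ q.2 = (x : Int)) ∧ 0 < cell grid q.1.toNat q.2.toNat)) with
     | some q => PySem.Dict.getD dirIndex ((x : Int) - q.2, (y : Int) - q.1) 0
     | none => 0) =
    (l.findSome? (fun q =>
        if 0 ≤ q.1 ∧ q.1 < (H : Int) ∧ 0 ≤ q.2 ∧ q.2 < (W : Int) ∧
            ¬(q.1 = (y : Int) ∧ q.2 = (x : Int)) ∧ 0 < cell grid q.1.toNat q.2.toNat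
        then some (PySem.Dict.getD dirIndex ((x : Int) - q.2, (y : Int) - q.1) 0)
        else none)).getD 0 := by
  induction l with
  | nil => rfl
  | cons a l ih =>
    by_cases h : (0 ≤ a.1 ∧ a.1 < (H : Int) ∧ 0 ≤ a.2 ∧ a.2 < (W : Int) ∧
        ¬(a.1 = (y : Int) ∧ a.2 = (x : Int)) ∧ 0 < cell grid a.1.toNat a.2.toNat)
    · rw [List.find?_cons_of_pos (by simp only [decide_eq_true_eq]; exact h), findSome?_cons_or, if_pos h]
      rfl
    · rw [List.find?_cons_of_neg (by simp only [decide_eq_true_eq]; exact h), findSome?_cons_or, if_neg h, Option.none_or]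
      exact ih

theorem match_opt (o : Option (Nat × Nat × Int)) :
    (match o with | some e => e.2.2 | none => 0) = (o.map (fun e => e.2.2)).getD 0 := by
  cases o <;> rfl

theorem cellA (grid : List (List Int)) (y x : Nat)
    (hy : y < grid.length) (hx : x < (grid.headD []).length) :
    cell (create_indexed_padding grid) y x =
      if cell grid y x = 0 then nbrVal grid grid.length (grid.headD []).length y x else 0 := by
  rw [A_flatten]
  rw [fold_cell _ hy hx _ (shaped_initPad _ _)
      (fun e he => by have h := mem_evAll he; exact ⟨h.1, h.2.1, h.2.2.1⟩)]
  rw [cell_initPad]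
  rw [if_neg (by omega : ¬ ((0:Int) ≠ 0))]
  by_cases hg : cell grid y x = 0
  · rw [if_pos hg, evAll_find_local y x hy hx hg, match_opt, map_findSome?]
    unfold nbrVal
    rw [nbr_chain]
    congr 1
    apply findSome?_congr
    intro q _
    split_ifs <;> rfl
  · rw [if_neg hg]
    have hnone : (evAll grid grid.length (grid.headD []).length).find?
        (fun e => e.1 == y && e.2.1 == x) = none := by
      rw [List.find?_eq_none]
      intro e he
      have h := mem_evAll he
      simp only [Bool.and_eq_true, beq_iff_eq, not_and]
      intro h1 h2
      rw [h1, h2] at h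
      exact absurd h.2.2.2 (by rw [← h1, ← h2] at hg ⊢; omega)
    rw [hnone]

theorem ports_eq (grid : List (List Int)) :
    create_indexed_padding grid = create_indexed_padding_alt grid := by
  have hsh : shaped grid.length (grid.headD []).length (create_indexed_padding grid) := by
    rw [A_flatten]; exact shaped_foldl_step (shaped_initPad _ _) _
  apply List.ext_getElem
  · rw [hsh.1]; simp [create_indexed_padding_alt]
  · intro y hy1 hy2
    have hyH : y < grid.length := by rw [hsh.1] at hy1; exact hy1
    apply List.ext_getElem
    · rw [hsh.2 _ (List.getElem_mem hy1)]
      simp [create_indexed_padding_alt]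
    · intro x hx1 hx2
      have hxW : x < (grid.headD []).length := by
        rw [hsh.2 _ (List.getElem_mem hy1)] at hx1; exact hx1
      have hA : (create_indexed_padding grid)[y][x] = cell (create_indexed_padding grid) y x := by
        simp [cell, List.getD_eq_getElem?_getD, List.getElem?_eq_getElem hy1,
              List.getElem?_eq_getElem hx1]
      rw [hA, cellA grid y x hyH hxW]
      simp [create_indexed_padding_alt]

-- ===== VERDICT (by name: the statement is the Claim_ definition above) =====
theorem create_indexed_padding_spec : Claim_equal_create_indexed_padding := by
  intro grid _ _
  unfold Spec_create_indexed_padding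
  exact ports_eq grid
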